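-- pv_equiv track=rewrite | github.com/Thajunniza/small-python-projects | 2-Birthday-Paradox/birthday_paradox/simulator.py | get_collision
-- ===== SOURCE A (Python) =====
-- def get_collision(birthdays: list[int]) -> dict[int,int]:
--     """
--     Find duplicates using sorting and two pointers.
--     Returns dictionary {birthday: count}.
--     """
--     collision = {}
--     if not birthdays:
--         return collision
--     birthdays.sort()
--     l = 0
--     i = 0
--     n = len(birthdays)
--     while i < n:
--         count = 0
--         while i < n and birthdays[i] == birthdays[l]:
--             count += 1
--             i += 1
--         if count > 1:
--             collision[birthdays[l]] = count
--         l = i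
--     return collision
-- ===== SOURCE B (Python) =====
-- def get_collision(birthdays: list[int]) -> dict[int, int]:
--     """
--     Find duplicates with a frequency table built in one pass.
--     Returns dictionary {birthday: count}.
--     """
--     birthdays.sort()
--     counts = {}
--     for v in birthdays:
--         counts[v] = counts.get(v, 0) + 1
--     return {v: c for v, c in counts.items() if c > 1}
-- ===== Notes on version B (the rewrite author's own statement) =====
-- stated objective: idiomatic
-- what changed: Replaces A's two-pointer run-scanning while loops over the sorted list by a single-pass frequency dict followed by a comprehension that keeps counts > 1 (key order still sorted because the dict is filled from the sorted list).
import Mathlib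
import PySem

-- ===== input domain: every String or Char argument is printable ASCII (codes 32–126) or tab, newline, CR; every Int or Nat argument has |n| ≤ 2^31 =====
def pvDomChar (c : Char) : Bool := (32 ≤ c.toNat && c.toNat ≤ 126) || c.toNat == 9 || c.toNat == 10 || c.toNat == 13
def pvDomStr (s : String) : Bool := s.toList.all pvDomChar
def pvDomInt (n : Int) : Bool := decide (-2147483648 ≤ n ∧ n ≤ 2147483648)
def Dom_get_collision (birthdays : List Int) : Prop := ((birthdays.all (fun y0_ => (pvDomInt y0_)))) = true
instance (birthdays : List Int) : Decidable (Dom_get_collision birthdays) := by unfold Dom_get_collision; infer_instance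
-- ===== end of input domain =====

-- B replaces A's two-pointer run scan by a one-pass frequency dict + a `count > 1` comprehension (same sorted key order).
-- Both Pythons sort the argument in place; the equivalence proved here is about the RETURN value.

-- ===== PORT A =====
-- inner while loop: 'while i < n and birthdays[i] == birthdays[l]: count += 1; i += 1'
def collInner (b : List Int) (n : Nat) (l i : Nat) (count : Int) : Int × Nat :=
  if h : i < n ∧ PySem.List.pyGetD b (i : Int) 0 = PySem.List.pyGetD b (l : Int) 0 then
    collInner b n l (i + 1) (count + 1)
  else (count, i)
termination_by n - i
decreasing_by omega

-- outer while loop; 'fuel' only makes the while-loop total (it is n at the top call, enough since i advances each iteration)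
def collOuter (b : List Int) (n fuel l i : Nat) (collision : PySem.Dict Int Int) : PySem.Dict Int Int :=
  match fuel with
  | 0 => collision
  | fuel + 1 =>
    if i < n then
      let r := collInner b n l i 0
      let collision' := if r.1 > 1 then collision.insert (PySem.List.pyGetD b (l : Int) 0) r.1 else collision
      collOuter b n fuel r.2 r.2 collision'
    else collision

def get_collision (birthdays : List Int) : List (Int × Int) :=
  let collision : PySem.Dict Int Int := PySem.Dict.empty
  if birthdays = [] then collision.items
  else
    let b := PySem.List.sorted birthdays (fun x => x)
    (collOuter b b.length b.length 0 0 collision).items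

-- ===== PORT B =====
def get_collision_alt (birthdays : List Int) : List (Int × Int) :=
  let s := PySem.List.sorted birthdays (fun x => x)
  let counts := s.foldl (fun d v => d.insert v (d.getD v 0 + 1)) PySem.Dict.empty
  counts.items.filter (fun p => decide (1 < p.2))

-- ===== PRECONDITION & SPEC =====
def Spec_get_collision (birthdays : List Int) (out : List (Int × Int)) : Prop := out = get_collision_alt birthdays
instance (birthdays : List Int) (out : List (Int × Int)) : Decidable (Spec_get_collision birthdays out) := by unfold Spec_get_collision; infer_instance

-- ===== CLAIM (what is proved, stated in full; the proofs are below) =====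
def Claim_equal_get_collision : Prop := ∀ (birthdays : List Int), Dom_get_collision birthdays → Spec_get_collision birthdays (get_collision birthdays)

-- ===== LEMMAS AND PROOFS =====

-- the inner while loop counts (and skips) the leading run of elements equal to b[l]
theorem inner_spec (b : List Int) (l i : Nat) (count : Int) :
    collInner b b.length l i count =
      (count + (((b.drop i).takeWhile (fun x => x == PySem.List.pyGetD b (l : Int) 0)).length : Int),
       i + ((b.drop i).takeWhile (fun x => x == PySem.List.pyGetD b (l : Int) 0)).length) := by
  rw [collInner]
  by_cases hi : i < b.length
  · have hdrop : b.drop i = b[i] :: b.drop (i + 1) := List.drop_eq_getElem_cons hi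
    have hget : PySem.List.pyGetD b (i : Int) 0 = b[i] := by
      rw [PySem.List.pyGetD_eq_getElem b 0 (by positivity) (by exact_mod_cast hi)]
      simp
    by_cases he : b[i] = PySem.List.pyGetD b (l : Int) 0
    · rw [dif_pos ⟨hi, by rw [hget, he]⟩, inner_spec b l (i + 1) (count + 1)]
      rw [hdrop, List.takeWhile_cons_of_pos (by simpa using he)]
      simp; constructor <;> [push_cast; skip] <;> ring
    · rw [dif_neg (by rw [hget]; tauto), hdrop,
        List.takeWhile_cons_of_neg (by simpa using he)]
      simp
  · rw [dif_neg (by tauto), List.drop_eq_nil_of_le (by omega)]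
    simp
termination_by b.length - i
decreasing_by omega

theorem foldl_add_cons_notmem (t : List Int) (v : Int) (hv : v ∉ t) :
    ∀ s : List Int, t.foldl PySem.Set.add (v :: s) = v :: t.foldl PySem.Set.add s := by
  induction t with
  | nil => intro s; rfl
  | cons x t ih =>
    intro s
    have hxv : (x == v) = false := by
      simp only [beq_eq_false_iff_ne, ne_eq]
      rintro rfl; exact hv (by simp)
    have hadd : PySem.Set.add (v :: s) x = v :: PySem.Set.add s x := by
      simp only [PySem.Set.add, PySem.Set.contains, List.contains_cons, hxv, Bool.false_or]
      split_ifs <;> rfl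
    rw [List.foldl_cons, List.foldl_cons, hadd]
    exact ih (fun h => hv (List.mem_cons_of_mem _ h)) _

theorem foldl_add_replicate (k : Nat) (v : Int) :
    ∀ s : PySem.Set Int, v ∈ s → (List.replicate k v).foldl PySem.Set.add s = s := by
  induction k with
  | zero => intro s _; rfl
  | succ k ih =>
    intro s hs
    have hstep : PySem.Set.add s v = s := by
      simp only [PySem.Set.add, PySem.Set.contains]
      rw [if_pos (by simpa using hs)]
    simpa [List.replicate_succ, hstep] using ih s hs

theorem ofList_run (k : Nat) (v : Int) (t : List Int) (hk : 0 < k) (hv : v ∉ t) :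
    PySem.Set.ofList (List.replicate k v ++ t) = v :: PySem.Set.ofList t := by
  obtain ⟨k', rfl⟩ : ∃ k', k = k' + 1 := ⟨k - 1, by omega⟩
  rw [PySem.Set.ofList_eq_foldl, PySem.Set.ofList_eq_foldl, List.foldl_append,
    List.replicate_succ, List.foldl_cons]
  have h1 : PySem.Set.add ([] : List Int) v = [v] := rfl
  rw [h1, foldl_add_replicate k' v [v] (by simp), foldl_add_cons_notmem t v hv []]

-- in a sorted list whose elements are all ≥ v, nothing after the leading run of v's equals v
theorem notmem_dropWhile_of_sorted (l : List Int) (v : Int) (hs : l.Pairwise (· ≤ ·))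
    (hhead : ∀ y ∈ l, v ≤ y) : v ∉ l.dropWhile (fun x => x == v) := by
  intro hmem
  have hne : l.dropWhile (fun x => x == v) ≠ [] := List.ne_nil_of_mem hmem
  obtain ⟨w, t', hwt⟩ := List.exists_cons_of_ne_nil hne
  have hw : (w == v) = false := by
    have h := List.head_dropWhile_not (fun x => x == v) hne
    simp only [hwt, List.head_cons] at h
    exact h
  have hwv : w ≠ v := by simpa using hw
  have hpair : (l.dropWhile (fun x => x == v)).Pairwise (· ≤ ·) :=
    List.Pairwise.sublist (List.dropWhile_sublist _) hs
  rw [hwt] at hpair hmem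
  rcases List.mem_cons.mp hmem with h | h
  · exact hwv h.symm
  · have h1 : w ≤ v := (List.pairwise_cons.mp hpair).1 v h
    have h2 : v ≤ w := hhead w (List.dropWhile_subset _ (hwt ▸ List.mem_cons_self ..))
    exact hwv (le_antisymm h1 h2)

-- the outer loop, started at a run boundary i (= l) with enough fuel, appends
-- exactly the duplicate runs of the suffix b.drop i to the accumulated dict
theorem outer_spec (b : List Int) (hs : b.Pairwise (· ≤ ·)) :
    ∀ (fuel i : Nat) (acc : PySem.Dict Int Int), b.length - i ≤ fuel →
      (∀ w ∈ b.drop i, acc.contains w = false) →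
      (collOuter b b.length fuel i i acc).items
        = acc.items ++ ((PySem.Set.ofList (b.drop i)).map
            (fun x => (x, ((b.drop i).count x : Int)))).filter (fun p => decide (1 < p.2)) := by
  intro fuel
  induction fuel with
  | zero =>
    intro i acc hf _
    rw [List.drop_eq_nil_of_le (by omega)]
    simp [collOuter]
  | succ fuel ih =>
    intro i acc hf hfresh
    by_cases hi : i < b.length
    · have hget : PySem.List.pyGetD b (i : Int) 0 = b[i] := by
        rw [PySem.List.pyGetD_eq_getElem b 0 (by positivity) (by exact_mod_cast hi)]
        simp
      have hdrop : b.drop i = b[i] :: b.drop (i + 1) := List.drop_eq_getElem_cons hi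
      set v := b[i] with hv
      set k := ((b.drop i).takeWhile (fun x => x == v)).length with hklen
      set t := (b.drop i).dropWhile (fun x => x == v) with htdef
      have hpairdrop : (b.drop i).Pairwise (· ≤ ·) := List.Pairwise.sublist (List.drop_sublist i b) hs
      have hhead : ∀ y ∈ b.drop i, v ≤ y := by
        intro y hy
        rw [hdrop] at hy hpairdrop
        rcases List.mem_cons.mp hy with rfl | hy'
        · exact le_refl _
        · exact (List.pairwise_cons.mp hpairdrop).1 y hy'
      have hvt : v ∉ t := notmem_dropWhile_of_sorted (b.drop i) v hpairdrop hhead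
      have hrun : b.drop i = List.replicate k v ++ t := by
        conv_lhs => rw [← List.takeWhile_append_dropWhile (p := fun x => x == v) (l := b.drop i)]
        rw [← htdef]
        congr 1
        rw [hklen]
        apply List.eq_replicate_of_mem
        intro x hx
        simpa using List.mem_takeWhile_imp hx
      have hk1 : 0 < k := by
        rw [hklen, hdrop, List.takeWhile_cons_of_pos (by simp)]
        simp
      have hdropik : b.drop (i + k) = t := by
        rw [← List.drop_drop, hrun, List.drop_left' (by simp)]
      have hmemt : ∀ w ∈ t, w ∈ b.drop i ∧ w ≠ v := by
        intro w hw
        refine ⟨by rw [hrun]; exact List.mem_append_right _ hw, ?_⟩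
        rintro rfl; exact hvt hw
      have hfreshv : acc.contains v = false := hfresh v (by rw [hdrop]; exact List.mem_cons_self ..)
      have hcv : (b.drop i).count v = k := by
        rw [hrun, List.count_append, List.count_replicate_self, List.count_eq_zero_of_not_mem hvt]
        omega
      have hct : ∀ w ∈ t, (b.drop i).count w = t.count w := by
        intro w hw
        have hz : List.count w (List.replicate k v) = 0 := by
          rw [List.count_eq_zero]
          intro hmem
          exact (hmemt w hw).2 (List.eq_of_mem_replicate hmem)
        rw [hrun, List.count_append, hz, Nat.zero_add]
      -- one unfolding of the outer loop
      rw [collOuter, if_pos hi, inner_spec b i i 0]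
      simp only [hget, ← hklen, Int.zero_add]
      have hacc' : ∀ w ∈ t,
          (if ((k : Int) > 1) then acc.insert v (k : Int) else acc).contains w = false := by
        intro w hw
        split_ifs with h1
        · rw [PySem.Dict.contains_insert, (hfresh w (hmemt w hw).1)]
          simp [(hmemt w hw).2]
        · exact hfresh w (hmemt w hw).1
      rw [ih (i + k) _ (by omega) (by rw [hdropik]; exact hacc')]
      have hitems : (if ((k : Int) > 1) then acc.insert v (k : Int) else acc).items
          = acc.items ++ (if (1 : Int) < (k : Int) then [(v, (k : Int))] else []) := by
        split_ifs with h1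
        · exact PySem.Dict.items_insert_of_not_contains acc _ hfreshv
        · simp
      rw [hitems, hdropik, List.append_assoc]
      congr 1
      have hof : PySem.Set.ofList (b.drop i) = v :: PySem.Set.ofList t := by
        rw [hrun, ofList_run k v t hk1 hvt]
      rw [hof, List.map_cons, List.filter_cons, hcv]
      rw [List.map_congr_left (f := fun x => (x, ((List.count x (b.drop i) : Nat) : Int)))
        (g := fun x => (x, ((t.count x : Nat) : Int)))
        (fun w hw => by simp only [hct w ((PySem.Set.mem_ofList t w).mp hw)])]
      by_cases h1 : (1 : Int) < (k : Int)
      · rw [if_pos h1, if_pos (by simpa using h1)]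
        rfl
      · rw [if_neg h1, if_neg (by simpa using h1)]
        simp
    · rw [List.drop_eq_nil_of_le (by omega)]
      simp [collOuter, if_neg hi]

-- B's fold is collections.Counter of the sorted list; its items are the distinct keys with their counts
theorem alt_items (xs : List Int) :
    get_collision_alt xs
      = ((PySem.Set.ofList (PySem.List.sorted xs (fun x => x))).map
          (fun x => (x, ((PySem.List.sorted xs (fun x => x)).count x : Int)))).filter
            (fun p => decide (1 < p.2)) := by
  unfold get_collision_alt
  simp only [PySem.Dict.foldl_insert_getD_add_one_eq_counter, PySem.Dict.items_counter]

-- ===== VERDICT (by name: the statement is the Claim_ definition above) =====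
theorem get_collision_spec : Claim_equal_get_collision := by
  intro xs _
  unfold Spec_get_collision
  rw [alt_items]
  unfold get_collision
  by_cases hnil : xs = []
  · subst hnil; rfl
  · rw [if_neg hnil]
    have h := outer_spec (PySem.List.sorted xs (fun x => x))
      (PySem.List.sorted_pairwise xs (fun x => x))
      (PySem.List.sorted xs (fun x => x)).length 0 PySem.Dict.empty (by omega)
      (by intro w _; rfl)
    simpa using h
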